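-- pv_equiv track=rewrite | github.com/super30admin/Binary-Search-3.1 | airRoutes.py | airRoutes
-- ===== SOURCE A (Python) =====
-- def airRoutes(arr1, arr2, capacity):
--     arr1.sort(key=lambda x: x[1])
--     arr2.sort(key=lambda x: x[1])
--
--     p1 = 0
--     p2 = len(arr2) - 1
--     closest = -1
--     res = []
--
--     while p1 < len(arr1) and p2 >= 0:
--         a_id, a_dist = arr1[p1]
--         b_id, b_dist = arr2[p2]
--         total = a_dist + b_dist
--
--         if total > capacity:
--             p2 -= 1
--         else:
--             if total > closest:
--                 closest = total
--                 res = []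
--
--             if total == closest:
--                 temp_p2 = p2
--                 while temp_p2 >= 0 and arr2[temp_p2][1] == b_dist:
--                     res.append((a_id, arr2[temp_p2][0]))
--                     temp_p2 -= 1
--
--             p1 += 1
--
--     return res
-- ===== SOURCE B (Python) =====
-- def airRoutes(arr1, arr2, capacity):
--     arr1.sort(key=lambda x: x[1])
--     arr2.sort(key=lambda x: x[1])
--     best = -1
--     res = []
--     for a_id, a_dist in arr1:
--         for b_id, b_dist in reversed(arr2):
--             total = a_dist + b_dist
--             if total > capacity:
--                 continue
--             if total > best:
--                 best = total
--                 res = []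
--             if total == best:
--                 res.append((a_id, b_id))
--     return res
-- ===== Notes on version B (the rewrite author's own statement) =====
-- stated objective: simpler
-- what changed: Replaces A's interleaved two-pointer sweep (with its separate equal-distance block re-scan loop) by a plain nested scan: for each a in sorted arr1, walk arr2 in descending distance order and maintain (best, res) directly.
import Mathlib
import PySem

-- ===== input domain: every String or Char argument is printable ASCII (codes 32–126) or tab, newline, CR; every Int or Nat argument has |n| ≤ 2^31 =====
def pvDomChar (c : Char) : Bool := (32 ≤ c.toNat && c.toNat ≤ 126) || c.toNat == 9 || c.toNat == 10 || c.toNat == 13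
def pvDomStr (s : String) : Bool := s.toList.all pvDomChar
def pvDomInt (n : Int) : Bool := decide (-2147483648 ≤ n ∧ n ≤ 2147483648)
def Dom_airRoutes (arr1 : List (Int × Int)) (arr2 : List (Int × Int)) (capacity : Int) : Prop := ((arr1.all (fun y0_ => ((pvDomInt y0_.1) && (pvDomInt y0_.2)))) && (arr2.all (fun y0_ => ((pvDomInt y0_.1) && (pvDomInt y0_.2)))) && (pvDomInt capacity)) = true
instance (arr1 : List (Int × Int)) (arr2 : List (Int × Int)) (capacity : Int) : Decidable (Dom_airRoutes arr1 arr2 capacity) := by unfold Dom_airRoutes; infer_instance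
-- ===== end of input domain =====

-- B replaces A's interleaved two-pointer sweep with a plain nested scan (sorted arr1 ascending × arr2 descending);
-- objective: simpler. Return-value equivalence only: both Pythons sort arr1 and arr2 in place identically.

-- ===== PORT A =====
-- inner 'while temp_p2 >= 0 and arr2[temp_p2][1] == b_dist' loop of A
def airRoutesBlock (s2 : List (Int × Int)) (a_id b_dist : Int) :
    Int → List (Int × Int) → List (Int × Int)
  | temp_p2, res =>
    if _h : 0 ≤ temp_p2 ∧ (s2.getD temp_p2.toNat (0, 0)).2 = b_dist then
      airRoutesBlock s2 a_id b_dist (temp_p2 - 1)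
        (res ++ [(a_id, (s2.getD temp_p2.toNat (0, 0)).1)])
    else res
  termination_by t _ => (t + 1).toNat
  decreasing_by omega

-- main 'while p1 < len(arr1) and p2 >= 0' loop of A
def airRoutesLoop (s1 s2 : List (Int × Int)) (capacity : Int) :
    Nat → Int → Int → List (Int × Int) → List (Int × Int)
  | p1, p2, closest, res =>
    if h : p1 < s1.length ∧ 0 ≤ p2 then
      let a := s1.getD p1 (0, 0)
      let b := s2.getD p2.toNat (0, 0)
      let total := a.2 + b.2
      if total > capacity then
        airRoutesLoop s1 s2 capacity p1 (p2 - 1) closest res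
      else
        let closest' := if total > closest then total else closest
        let res' := if total > closest then [] else res
        let res'' := if total = closest' then airRoutesBlock s2 a.1 b.2 p2 res' else res'
        airRoutesLoop s1 s2 capacity (p1 + 1) p2 closest' res''
    else res
  termination_by p1 p2 _ _ => (s1.length - p1) + (p2 + 1).toNat
  decreasing_by all_goals omega

def airRoutes (arr1 : List (Int × Int)) (arr2 : List (Int × Int)) (capacity : Int) : List (Int × Int) :=
  let s1 := PySem.List.sorted arr1 (fun x => x.2) false
  let s2 := PySem.List.sorted arr2 (fun x => x.2) false
  airRoutesLoop s1 s2 capacity 0 ((s2.length : Int) - 1) (-1) []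

-- ===== PORT B =====
-- body of B's inner 'for b_id, b_dist in reversed(arr2)' loop
def altStep (capacity : Int) (a : Int × Int) (st : Int × List (Int × Int)) (b : Int × Int) :
    Int × List (Int × Int) :=
  let total := a.2 + b.2
  if total > capacity then st
  else
    let best := if total > st.1 then total else st.1
    let res := if total > st.1 then [] else st.2
    if total = best then (best, res ++ [(a.1, b.1)]) else (best, res)

def airRoutes_alt (arr1 : List (Int × Int)) (arr2 : List (Int × Int)) (capacity : Int) : List (Int × Int) :=
  let s1 := PySem.List.sorted arr1 (fun x => x.2) false
  let s2 := PySem.List.sorted arr2 (fun x => x.2) false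
  (s1.foldl (fun st a => s2.reverse.foldl (altStep capacity a) st) ((-1 : Int), [])).2

-- ===== PRECONDITION & SPEC =====
def Spec_airRoutes (arr1 : List (Int × Int)) (arr2 : List (Int × Int)) (capacity : Int) (out : List (Int × Int)) : Prop := out = airRoutes_alt arr1 arr2 capacity
instance (arr1 : List (Int × Int)) (arr2 : List (Int × Int)) (capacity : Int) (out : List (Int × Int)) : Decidable (Spec_airRoutes arr1 arr2 capacity out) := by unfold Spec_airRoutes; infer_instance

-- ===== CLAIM (what is proved, stated in full; the proofs are below) =====
def Claim_equal_airRoutes : Prop := ∀ (arr1 : List (Int × Int)) (arr2 : List (Int × Int)) (capacity : Int), Dom_airRoutes arr1 arr2 capacity → Spec_airRoutes arr1 arr2 capacity (airRoutes arr1 arr2 capacity)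

-- ===== LEMMAS AND PROOFS =====

-- a fold whose every step keeps the state unchanged is the identity
theorem foldl_fixed {α β : Type} (f : β → α → β) (l : List α) (st : β)
    (h : ∀ st' x, x ∈ l → f st' x = st') : l.foldl f st = st := by
  induction l generalizing st with
  | nil => rfl
  | cons x t ih =>
    simp only [List.foldl_cons, h st x (by simp)]
    exact ih st (fun st' y hy => h st' y (by simp [hy]))

-- a fold whose every step keeps the first component and the state when started at best
theorem foldl_fst_fixed {α γ : Type} (f : (Int × γ) → α → (Int × γ)) (l : List α) (b : Int) (r : γ)
    (h : ∀ r' x, x ∈ l → f (b, r') x = (b, r')) : l.foldl f (b, r) = (b, r) := by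
  induction l generalizing r with
  | nil => rfl
  | cons x t ih =>
    simp only [List.foldl_cons, h r x (by simp)]
    exact ih r (fun r' y hy => h r' y (by simp [hy]))

-- every element of the dropWhile of a descending (by dist) list bounded by bd is strictly below bd
theorem dropWhile_lt (bd : Int) : ∀ (l : List (Int × Int)),
    l.Pairwise (fun u v => v.2 ≤ u.2) → (∀ x ∈ l, x.2 ≤ bd) →
    ∀ x ∈ l.dropWhile (fun y => y.2 == bd), x.2 < bd := by
  intro l
  induction l with
  | nil => simp
  | cons h t ih =>
    intro hp hb x hx
    rw [List.dropWhile_cons] at hx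
    by_cases hh : (h.2 == bd) = true
    · rw [if_pos hh] at hx
      exact ih (List.pairwise_cons.mp hp).2 (fun y hy => hb y (by simp [hy])) x hx
    · rw [if_neg hh] at hx
      have hne : h.2 ≠ bd := by simpa using hh
      rcases List.mem_cons.mp hx with rfl | hxt
      · exact lt_of_le_of_ne (hb x (by simp)) hne
      · have : x.2 ≤ h.2 := (List.pairwise_cons.mp hp).1 x hxt
        have : x.2 ≤ bd := le_trans this (hb h (by simp))
        exact lt_of_le_of_ne this (by
          intro hEq
          exact hne (le_antisymm (hb h (by simp)) (hEq ▸ (List.pairwise_cons.mp hp).1 x hxt)))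

-- steps that append one mapped element each keep the first component and accumulate the map
theorem foldl_fst_append {α γ : Type} (f : (Int × List γ) → α → (Int × List γ)) (l : List α)
    (b : Int) (g : α → γ)
    (h : ∀ r x, x ∈ l → f (b, r) x = (b, r ++ [g x])) :
    ∀ r0, l.foldl f (b, r0) = (b, r0 ++ l.map g) := by
  induction l with
  | nil => intro r0; simp
  | cons x t ih =>
    intro r0
    rw [List.foldl_cons, h r0 x (by simp)]
    rw [ih (fun r y hy => h r y (by simp [hy])) (r0 ++ [g x])]
    simp

-- A's inner while-loop collects the maximal equal-dist suffix of the prefix, in reverse order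
theorem block_eq (s2 : List (Int × Int)) (aid bd : Int) :
    ∀ (n : Nat) (t : Int), (t + 1).toNat = n → t < (s2.length : Int) → ∀ res,
    airRoutesBlock s2 aid bd t res
      = res ++ ((s2.take (t + 1).toNat).reverse.takeWhile (fun y => y.2 == bd)).map
          (fun y => (aid, y.1)) := by
  intro n
  induction n with
  | zero =>
    intro t hn _ res
    rw [airRoutesBlock]
    rw [dif_neg (by omega)]
    rw [hn]
    simp
  | succ n ih =>
    intro t hn hlen res
    have h0 : 0 ≤ t := by omega
    have htn : t.toNat < s2.length := by omega
    have hget : s2.getD t.toNat (0, 0) = s2[t.toNat] := List.getD_eq_getElem s2 (0,0) htn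
    have htake : s2.take (t + 1).toNat = s2.take t.toNat ++ [s2[t.toNat]] := by
      have : (t + 1).toNat = t.toNat + 1 := by omega
      rw [this, List.take_succ, List.getElem?_eq_getElem htn]
      rfl
    rw [airRoutesBlock]
    by_cases hd : (s2.getD t.toNat (0, 0)).2 = bd
    · rw [dif_pos ⟨h0, hd⟩]
      have hn' : (t - 1 + 1).toNat = n := by omega
      rw [ih (t - 1) hn' (by omega)]
      rw [htake]
      have hpred : (s2[t.toNat].2 == bd) = true := by
        rw [hget] at hd; simpa using hd
      rw [List.reverse_append]
      simp only [List.reverse_singleton, List.singleton_append]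
      rw [List.takeWhile_cons_of_pos (by simpa using hpred)]
      have : (t - 1 + 1).toNat = t.toNat := by omega
      rw [this, hget]
      simp
    · rw [dif_neg (by intro hc; exact hd hc.2)]
      rw [htake]
      have hpred : (s2[t.toNat].2 == bd) = false := by
        rw [hget] at hd; simpa using hd
      rw [List.reverse_append]
      simp only [List.reverse_singleton, List.singleton_append]
      rw [List.takeWhile_cons_of_neg (by simpa using hpred)]
      simp

-- pointwise characterization of B's inner step
theorem altStep_gt (cap : Int) (a x : Int × Int) (st : Int × List (Int × Int))
    (h : a.2 + x.2 > cap) : altStep cap a st x = st := by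
  simp only [altStep]
  rw [if_pos h]

theorem altStep_lt (cap : Int) (a x : Int × Int) (c : Int) (r : List (Int × Int))
    (h1 : a.2 + x.2 ≤ cap) (h2 : a.2 + x.2 < c) : altStep cap a (c, r) x = (c, r) := by
  simp only [altStep]
  rw [if_neg (by omega)]
  simp only [if_neg (show ¬ a.2 + x.2 > c by omega)]
  rw [if_neg (by omega)]

theorem altStep_eq (cap : Int) (a x : Int × Int) (c : Int) (r : List (Int × Int))
    (h1 : a.2 + x.2 ≤ cap) (h2 : a.2 + x.2 = c) :
    altStep cap a (c, r) x = (c, r ++ [(a.1, x.1)]) := by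
  simp only [altStep]
  rw [if_neg (by omega)]
  simp only [if_neg (show ¬ a.2 + x.2 > c by omega)]
  rw [if_pos h2]

theorem altStep_gtc (cap : Int) (a x : Int × Int) (c : Int) (r : List (Int × Int))
    (h1 : a.2 + x.2 ≤ cap) (h2 : a.2 + x.2 > c) :
    altStep cap a (c, r) x = (a.2 + x.2, [(a.1, x.1)]) := by
  simp only [altStep]
  rw [if_neg (by omega)]
  simp only [if_pos h2]
  simp

-- B's full descending scan of arr2, for one a, performs exactly A's non-decrement step
theorem inner_scan (cap : Int) (a b : Int × Int) (s2 : List (Int × Int)) (p2 : Int)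
    (c : Int) (r : List (Int × Int))
    (hs2 : s2.Pairwise (fun u v => u.2 ≤ v.2))
    (h0 : 0 ≤ p2) (hlen : p2 < (s2.length : Int))
    (hb : s2.getD p2.toNat (0, 0) = b)
    (hfeas : a.2 + b.2 ≤ cap)
    (hinv : ∀ x ∈ s2.drop (p2 + 1).toNat, a.2 + x.2 > cap) :
    s2.reverse.foldl (altStep cap a) (c, r)
      = ((if a.2 + b.2 > c then a.2 + b.2 else c),
         if a.2 + b.2 = (if a.2 + b.2 > c then a.2 + b.2 else c)
         then airRoutesBlock s2 a.1 b.2 p2 (if a.2 + b.2 > c then [] else r)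
         else (if a.2 + b.2 > c then [] else r)) := by
  have hp2n : p2.toNat < s2.length := by omega
  have hk : (p2 + 1).toNat = p2.toNat + 1 := by omega
  have h1 : s2.reverse = (s2.drop (p2.toNat + 1)).reverse ++ (s2.take (p2.toNat + 1)).reverse := by
    rw [← List.reverse_append, List.take_append_drop]
  rw [h1, List.foldl_append]
  have hdropfix : List.foldl (altStep cap a) (c, r) (s2.drop (p2.toNat + 1)).reverse = (c, r) := by
    apply foldl_fixed
    intro st x hx
    apply altStep_gt
    exact hinv x (by rw [hk]; exact List.mem_reverse.mp hx)
  rw [hdropfix]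
  have hbe : s2[p2.toNat] = b := by rw [← hb]; exact (List.getD_eq_getElem s2 (0, 0) hp2n).symm
  have htake : s2.take (p2.toNat + 1) = s2.take p2.toNat ++ [b] := by
    rw [List.take_succ, List.getElem?_eq_getElem hp2n, hbe]; rfl
  rw [htake, List.reverse_append]
  simp only [List.reverse_singleton, List.singleton_append, List.foldl_cons]
  have htp : (s2.take p2.toNat).Pairwise (fun u v => u.2 ≤ v.2) :=
    hs2.sublist (List.take_sublist _ _)
  have hub : ∀ x ∈ s2.take p2.toNat, x.2 ≤ b.2 := by
    have hp : (s2.take (p2.toNat + 1)).Pairwise (fun u v => u.2 ≤ v.2) :=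
      hs2.sublist (List.take_sublist _ _)
    rw [htake] at hp
    intro x hx
    exact (List.pairwise_append.mp hp).2.2 x hx b (by simp)
  have hubR : ∀ x ∈ (s2.take p2.toNat).reverse, x.2 ≤ b.2 :=
    fun x hx => hub x (List.mem_reverse.mp hx)
  have hrev : (s2.take p2.toNat).reverse.Pairwise (fun u v => v.2 ≤ u.2) := by
    rw [List.pairwise_reverse]; exact htp
  have hblk : ∀ x ∈ (s2.take p2.toNat).reverse.takeWhile (fun y => y.2 == b.2), x.2 = b.2 := by
    intro x hx
    simpa using List.mem_takeWhile_imp hx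
  have hlow : ∀ x ∈ (s2.take p2.toNat).reverse.dropWhile (fun y => y.2 == b.2), x.2 < b.2 :=
    dropWhile_lt b.2 _ hrev hubR
  by_cases hlt : a.2 + b.2 < c
  · have hstep : altStep cap a (c, r) b = (c, r) := altStep_lt cap a b c r hfeas hlt
    rw [hstep]
    have hfix : List.foldl (altStep cap a) (c, r) (s2.take p2.toNat).reverse = (c, r) := by
      apply foldl_fst_fixed
      intro r' x hx
      have hxle : x.2 ≤ b.2 := hubR x hx
      by_cases hxc : a.2 + x.2 > cap
      · exact altStep_gt cap a x (c, r') hxc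
      · exact altStep_lt cap a x c r' (by omega) (by omega)
    rw [hfix]
    rw [if_neg (show ¬ a.2 + b.2 > c by omega)]
    rw [if_neg (show ¬ a.2 + b.2 = c by omega)]
    rw [if_neg (show ¬ a.2 + b.2 > c by omega)]
  · have hceq : (if a.2 + b.2 > c then a.2 + b.2 else c) = a.2 + b.2 := by split_ifs <;> omega
    have hstep : altStep cap a (c, r) b
        = (a.2 + b.2, (if a.2 + b.2 > c then [] else r) ++ [(a.1, b.1)]) := by
      by_cases hgt : a.2 + b.2 > c
      · rw [if_pos hgt, altStep_gtc cap a b c r hfeas hgt]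
        simp
      · have heq : a.2 + b.2 = c := by omega
        rw [if_neg hgt, altStep_eq cap a b c r hfeas heq, heq]
    rw [hstep]
    have hdecomp : (s2.take p2.toNat).reverse
        = (s2.take p2.toNat).reverse.takeWhile (fun y => y.2 == b.2)
          ++ (s2.take p2.toNat).reverse.dropWhile (fun y => y.2 == b.2) :=
      (List.takeWhile_append_dropWhile).symm
    have hblkfold : ∀ r1, List.foldl (altStep cap a) (a.2 + b.2, r1)
        ((s2.take p2.toNat).reverse.takeWhile (fun y => y.2 == b.2))
        = (a.2 + b.2, r1 ++ ((s2.take p2.toNat).reverse.takeWhile (fun y => y.2 == b.2)).map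
            (fun x => (a.1, x.1))) := by
      intro r1
      apply foldl_fst_append
      intro r' x hx
      have hx2 : x.2 = b.2 := hblk x hx
      exact altStep_eq cap a x (a.2 + b.2) r' (by omega) (by omega)
    have hlowfold : ∀ r1, List.foldl (altStep cap a) (a.2 + b.2, r1)
        ((s2.take p2.toNat).reverse.dropWhile (fun y => y.2 == b.2)) = (a.2 + b.2, r1) := by
      intro r1
      apply foldl_fst_fixed
      intro r' x hx
      have hxlt : x.2 < b.2 := hlow x hx
      by_cases hxc : a.2 + x.2 > cap
      · exact altStep_gt cap a x _ hxc
      · exact altStep_lt cap a x (a.2 + b.2) r' (by omega) (by omega)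
    conv_lhs => rw [hdecomp]
    rw [List.foldl_append, hblkfold, hlowfold]
    rw [hceq, if_pos rfl]
    rw [block_eq s2 a.1 b.2 (p2 + 1).toNat p2 rfl hlen]
    rw [hk, htake, List.reverse_append]
    simp only [List.reverse_singleton, List.singleton_append]
    rw [List.takeWhile_cons_of_pos (by simp)]
    simp

-- the main simulation: A's two-pointer loop equals B's remaining nested folds
theorem loop_eq (s1 s2 : List (Int × Int)) (cap : Int) :
    ∀ (n : Nat) (rest : List (Int × Int)) (p1 : Nat) (p2 c : Int) (r : List (Int × Int)),
    s1.drop p1 = rest →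
    rest.length + (p2 + 1).toNat ≤ n →
    rest.Pairwise (fun u v => u.2 ≤ v.2) →
    s2.Pairwise (fun u v => u.2 ≤ v.2) →
    -1 ≤ p2 → p2 < (s2.length : Int) →
    (∀ x ∈ s2.drop (p2 + 1).toNat, ∀ y ∈ rest, y.2 + x.2 > cap) →
    airRoutesLoop s1 s2 cap p1 p2 c r
      = (rest.foldl (fun st a => s2.reverse.foldl (altStep cap a) st) (c, r)).2 := by
  intro n
  induction n with
  | zero =>
    intro rest p1 p2 c r hdrop hmeas hrest hs2 hm1 hlen hinv
    have hr0 : rest = [] := List.eq_nil_of_length_eq_zero (by omega)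
    subst hr0
    have hp1 : s1.length ≤ p1 := by
      have := congrArg List.length hdrop
      simp [List.length_drop] at this
      omega
    rw [airRoutesLoop, dif_neg (by intro hc; omega)]
    simp
  | succ n ih =>
    intro rest p1 p2 c r hdrop hmeas hrest hs2 hm1 hlen hinv
    by_cases hg : p1 < s1.length ∧ 0 ≤ p2
    · obtain ⟨hp1, hp2⟩ := hg
      have hne : rest ≠ [] := by
        rw [← hdrop]
        intro hnil
        have := List.drop_eq_nil_iff.mp hnil
        omega
      obtain ⟨a, rest', rfl⟩ := List.exists_cons_of_ne_nil hne
      have hget : s1[p1]? = some a := by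
        have h0 : (s1.drop p1)[0]? = some a := by rw [hdrop]; rfl
        rw [List.getElem?_drop] at h0
        simpa using h0
      have ha : s1.getD p1 (0, 0) = a := by
        rw [List.getD_eq_getElem?_getD, hget]
        rfl
      have hdrop' : s1.drop (p1 + 1) = rest' := by
        have h := congrArg (fun l => List.drop 1 l) hdrop
        simp only at h
        rw [List.drop_drop] at h
        simpa [Nat.add_comm] using h
      have hale : ∀ y ∈ a :: rest', a.2 ≤ y.2 := by
        intro y hy
        rcases List.mem_cons.mp hy with rfl | hy'
        · exact le_refl _
        · exact (List.pairwise_cons.mp hrest).1 y hy'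
      rw [airRoutesLoop, dif_pos ⟨hp1, hp2⟩]
      dsimp only
      rw [ha]
      by_cases hcap : a.2 + (s2.getD p2.toNat (0, 0)).2 > cap
      · rw [if_pos hcap]
        have hbg : s2.getD p2.toNat (0, 0) = s2[p2.toNat] :=
          List.getD_eq_getElem s2 (0, 0) (by omega)
        have hdr : s2.drop (p2 - 1 + 1).toNat = s2[p2.toNat] :: s2.drop (p2 + 1).toNat := by
          rw [show (p2 - 1 + 1).toNat = p2.toNat by omega,
            show (p2 + 1).toNat = p2.toNat + 1 by omega]
          exact List.drop_eq_getElem_cons (by omega)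
        apply ih (a :: rest') p1 (p2 - 1) c r hdrop (by simp at hmeas ⊢; omega) hrest hs2
          (by omega) (by omega)
        intro x hx y hy
        rw [hdr] at hx
        rcases List.mem_cons.mp hx with rfl | hx'
        · have hyb : a.2 ≤ y.2 := hale y hy
          rw [hbg] at hcap
          omega
        · exact hinv x hx' y hy
      · rw [if_neg hcap]
        conv_rhs => rw [List.foldl_cons]
        rw [inner_scan cap a (s2.getD p2.toNat (0, 0)) s2 p2 c r hs2 hp2 hlen rfl (by omega)
          (fun x hx => hinv x hx a (by simp))]
        exact ih rest' (p1 + 1) p2 _ _ hdrop' (by simp at hmeas ⊢; omega)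
          (List.pairwise_cons.mp hrest).2 hs2 (by omega) hlen
          (fun x hx y hy => hinv x hx y (by simp [hy]))
    · rw [airRoutesLoop, dif_neg hg]
      by_cases hp1 : p1 < s1.length
      · have hp2 : p2 = -1 := by
          rcases not_and_or.mp hg with h | h
          · exact absurd hp1 h
          · omega
        have hF : ∀ (st : Int × List (Int × Int)) (y : Int × Int), y ∈ rest →
            s2.reverse.foldl (altStep cap y) st = st := by
          intro st y hy
          apply foldl_fixed
          intro st' x hx
          apply altStep_gt
          exact hinv x
            (by rw [show (p2 + 1).toNat = 0 by omega]; simpa using List.mem_reverse.mp hx) y hy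
        rw [foldl_fixed _ _ _ hF]
      · have : rest = [] := by
          rw [← hdrop]
          exact List.drop_eq_nil_iff.mpr (by omega)
        subst this
        simp

theorem airRoutes_spec : Claim_equal_airRoutes := by
  intro arr1 arr2 capacity _hdom
  unfold Spec_airRoutes airRoutes airRoutes_alt
  dsimp only
  apply loop_eq _ _ _
    ((PySem.List.sorted arr1 (fun x => x.2) false).length
      + (((PySem.List.sorted arr2 (fun x => x.2) false).length : Int) - 1 + 1).toNat)
  · rfl
  · omega
  · exact PySem.List.sorted_pairwise arr1 (fun x => x.2)
  · exact PySem.List.sorted_pairwise arr2 (fun x => x.2)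
  · omega
  · omega
  · intro x hx
    have : ((((PySem.List.sorted arr2 (fun x => x.2) false).length : Int) - 1 + 1).toNat)
        = (PySem.List.sorted arr2 (fun x => x.2) false).length := by omega
    rw [this, List.drop_length] at hx
    simp at hx
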